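/- GENERATED by farm/mkstatement.py from design/units.tsv (unit `start_decoder.C5b`) and the assertions of Vorbis/Spec/StartDecoderC5.lean — do not edit.
   THE STATEMENT of the proof unit `start_decoder.C5b`: segment C5b of `start_decoder` (18 instructions; entries 0x1145e9;
   exits 0x113b22,0x11461d; ranges 0x1145e9-0x114618 + 0x114825-0x114837)
   takes each of its entry assertions to one of its exit assertions (`Vorbis.Spec.StartDecoder.SegC5b`), given the contracts of its callees.
   What the names mean: Vorbis/Spec/Basic.lean (the shared hypotheses), Vorbis/Spec/StartDecoderC5.lean (the assertions). The theorem to prove: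
   `theorem start_decoder_C5b_ok : Vorbis.Spec.start_decoder_C5b.Statement`. -/
import Vorbis.Spec.Leaves
import Vorbis.Spec.Libc
import Vorbis.Spec.StartDecoderC5
namespace Vorbis.Spec.start_decoder_C5b
open X86 X86.User Asan

/-- The statement of unit `start_decoder.C5b`. -/
def Statement : Prop :=
  ∀ (Lay : Layout) (_hLay : Lay.hi = 0x1000000) (μ : Microarch) (_hμ : UserX.MicroOK μ) (u₀ : State)
    (_hcode : HasCodeNat Lay u₀ Vorbis.L.start_decoder.entry Vorbis.Code.code_start_decoder.nat Vorbis.L.start_decoder.size)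
    (_h_asan_load4_noabort : Asan.SmallCheck Lay μ Vorbis.WayInv (Vorbis.CodeOK u₀) [.rax, .rcx, .rdx] 4 Vorbis.L.__asan_load4_noabort.entry)
    (_h_asan_store8_noabort : Asan.SmallCheck Lay μ Vorbis.WayInv (Vorbis.CodeOK u₀) [.rax, .rcx, .rdx] 8 Vorbis.L.__asan_store8_noabort.entry)
    (_h_memcpy : ∀ (others : List Obj) (frames : List (Nat × FrameLayout)), Calls Lay μ Vorbis.WayInv (Vorbis.conv u₀) Vorbis.L.memcpy.entry (Vorbis.Spec.memcpy.spec others frames))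
    (_h_error : ∀ (others : List Obj) (frames : List (Nat × FrameLayout)), Calls Lay μ Vorbis.WayInv (Vorbis.conv u₀) Vorbis.L.error.entry (Vorbis.Spec.error.spec others frames)),
    Vorbis.Spec.StartDecoder.SegC5b Lay μ u₀

end Vorbis.Spec.start_decoder_C5b
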